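-- pv_equiv track=rewrite | github.com/DuarteMateus2005/Prog_I | Projeto.py | imprimirLances
-- ===== SOURCE A (Python) =====
-- def imprimirLances(partida):
--     res = ''
--     nJogadas = len(partida[1])-1
--     nLinhas = min(10,nJogadas)+1
--     for n in range(1,nLinhas):
--         jogadaImprimir = n
--         while jogadaImprimir <= nJogadas:
--             if jogadaImprimir>=10 and jogadaImprimir<100:
--                 res+=' '
--             elif jogadaImprimir<10:
--                 res+='  '
--             res+=f'{jogadaImprimir}. '
--             res+= chr(97+partida[1][jogadaImprimir][1])
--             if partida[1][jogadaImprimir][0]+1 <10: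
--                 res+= f'{partida[1][jogadaImprimir][0]+1} '
--             else:
--                 res+= f'{partida[1][jogadaImprimir][0]+1}'
--             jogadaImprimir+=10
--             if(jogadaImprimir <= nJogadas):
--                 res+=' '
--         res+='\n'
--     return res
-- ===== SOURCE B (Python) =====
-- def imprimirLances(partida):
--     moves = partida[1]
--     nJogadas = len(moves) - 1
--     if nJogadas <= 0:
--         return ''
--     lines = [[] for _ in range(min(10, nJogadas))]
--     for j in range(1, nJogadas + 1):
--         if j < 10:
--             pad = '  '
--         elif j < 100:
--             pad = ' '
--         else:
--             pad = ''
--         row = moves[j][0] + 1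
--         tail = f'{row} ' if row < 10 else f'{row}'
--         lines[(j - 1) % 10].append(pad + f'{j}. ' + chr(97 + moves[j][1]) + tail)
--     return ''.join(' '.join(line) + '\n' for line in lines)
-- ===== Notes on version B (the rewrite author's own statement) =====
-- stated objective: alternative
-- what changed: A prints column-major with a nested loop (for each of the up-to-10 output lines, a while loop strides through moves n, n+10, n+20, ...); B makes one forward pass over moves 1..nJogadas, scattering each formatted token into a bucket lines[(j-1)%10], then joins each bucket with ' ' and appends '\n'.
-- outside the precondition, e.g. on imprimirLances([[], [[0, 0], [0, 60000]]]): A returns '  1. \ueac11 \n', B returns '  1. \ueac11 \n'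
import Mathlib
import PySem

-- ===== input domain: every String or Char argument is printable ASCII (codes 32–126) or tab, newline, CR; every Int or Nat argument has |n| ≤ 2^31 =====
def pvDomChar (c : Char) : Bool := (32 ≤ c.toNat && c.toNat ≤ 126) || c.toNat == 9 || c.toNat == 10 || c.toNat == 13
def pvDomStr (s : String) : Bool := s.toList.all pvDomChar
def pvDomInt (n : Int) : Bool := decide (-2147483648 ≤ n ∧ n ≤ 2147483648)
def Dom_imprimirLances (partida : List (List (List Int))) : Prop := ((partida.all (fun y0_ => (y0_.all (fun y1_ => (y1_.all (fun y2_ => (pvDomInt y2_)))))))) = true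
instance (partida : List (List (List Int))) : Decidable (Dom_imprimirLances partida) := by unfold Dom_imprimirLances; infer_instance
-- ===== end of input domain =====

-- B replaces A's column-major nested loop (one stride-10 while loop per printed line)
-- by a single forward pass that scatters each move's token into bucket (j-1) % 10,
-- then joins the buckets; same output (alternative decomposition, not faster).

-- ===== PORT A =====
-- The per-move token text; this formatting is written identically in A and in B (Source B),
-- so both ports share this helper.  chr(97+c) is ported as Char.ofNat; exact under
-- Pre_imprimirLances (codepoint in range and not a surrogate).
def pvTok (moves : List (List Int)) (j : Int) : String :=
  (if 10 ≤ j ∧ j < 100 then " "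
   else if j < 10 then "  " else "")
  ++ PySem.Int.toStr j ++ ". "
  ++ String.ofList [Char.ofNat (97 + (moves.getD j.toNat []).getD 1 0).toNat]
  ++ (if (moves.getD j.toNat []).getD 0 0 + 1 < 10
      then PySem.Int.toStr ((moves.getD j.toNat []).getD 0 0 + 1) ++ " "
      else PySem.Int.toStr ((moves.getD j.toNat []).getD 0 0 + 1))

-- A's inner 'while jogadaImprimir <= nJogadas' loop, accumulating into res.
def pvWhileA (moves : List (List Int)) (nJ : Int) (j : Int) (res : String) : String :=
  if j ≤ nJ then
    pvWhileA moves nJ (j + 10) (res ++ pvTok moves j ++ (if j + 10 ≤ nJ then " " else ""))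
  else res
termination_by (nJ + 1 - j).toNat
decreasing_by simp; omega

def imprimirLances (partida : List (List (List Int))) : String :=
  let moves := partida.getD 1 []                   -- partida[1]; in range under Pre_
  let nJ : Int := (moves.length : Int) - 1
  let nLinhas : Int := min 10 nJ + 1
  (PySem.List.pyRange 1 nLinhas 1).foldl (fun res n => pvWhileA moves nJ n res ++ "\n") ""

-- ===== PORT B =====
def imprimirLances_alt (partida : List (List (List Int))) : String :=
  let moves := partida.getD 1 []                   -- partida[1]; in range under Pre_
  let nJ : Int := (moves.length : Int) - 1
  if nJ ≤ 0 then ""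
  else
    let lines := (PySem.List.pyRange 1 (nJ + 1) 1).foldl
      (fun bs j => bs.set ((j - 1) % 10).toNat
        (bs.getD ((j - 1) % 10).toNat [] ++ [pvTok moves j]))
      (List.replicate (min 10 nJ).toNat ([] : List String))
    String.join (lines.map (fun line => PySem.Str.join " " line ++ "\n"))

-- ===== PRECONDITION & SPEC =====
-- Pre_ excludes the inputs where A raises (IndexError when partida has fewer than 2 sublists or
-- an accessed move has fewer than 2 entries; ValueError when 97+column is outside chr's range)
-- and, although A returns there, moves whose character code 97+c is at or beyond the UTF-16
-- surrogate block (≥ U+D800): surrogates have no Lean Char/String representation, and for one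
-- clean bound every code from U+D800 up is excluded.
def Pre_imprimirLances (partida : List (List (List Int))) : Prop :=
  2 ≤ partida.length ∧
  ∀ m ∈ (partida.getD 1 []).drop 1,
    2 ≤ m.length ∧ -97 ≤ m.getD 1 0 ∧ m.getD 1 0 ≤ 55198
instance (partida : List (List (List Int))) : Decidable (Pre_imprimirLances partida) := by
  unfold Pre_imprimirLances; infer_instance

def pvWitness_imprimirLances : List (List (List Int)) := [[], [[0, 0], [3, 4], [11, 25]]]

def Spec_imprimirLances (partida : List (List (List Int))) (out : String) : Prop := out = imprimirLances_alt partida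
instance (partida : List (List (List Int))) (out : String) : Decidable (Spec_imprimirLances partida out) := by unfold Spec_imprimirLances; infer_instance

-- ===== CLAIM (what is proved, stated in full; the proofs are below) =====
def Claim_equal_imprimirLances : Prop := ∀ (partida : List (List (List Int))), Dom_imprimirLances partida → Pre_imprimirLances partida → Spec_imprimirLances partida (imprimirLances partida)

-- ===== LEMMAS AND PROOFS =====

-- The list of tokens of one printed line: moves j, j+10, j+20, … up to m.
def pvChain (moves : List (List Int)) (m j : Int) : List String :=
  if j ≤ m then pvTok moves j :: pvChain moves m (j + 10) else []
termination_by (m + 1 - j).toNat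
decreasing_by simp; omega

lemma pvSJoin_nil (s : String) : PySem.Str.join s [] = "" := by
  apply String.toList_injective
  rw [PySem.Str.toList_join]; simp [PySem.Chars.join_nil]

lemma pvSJoin_singleton (s a : String) : PySem.Str.join s [a] = a := by
  apply String.toList_injective
  rw [PySem.Str.toList_join]; simp [PySem.Chars.join_singleton]

lemma pvSJoin_cons_cons (s a b : String) (t : List String) :
    PySem.Str.join s (a :: b :: t) = a ++ s ++ PySem.Str.join s (b :: t) := by
  apply String.toList_injective
  rw [PySem.Str.toList_join]
  simp [PySem.Chars.join_cons_cons, PySem.Str.toList_join]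

lemma pvWhileA_eq (moves : List (List Int)) (nJ : Int) :
    ∀ (N : Nat) (j : Int) (res : String), (nJ + 1 - j).toNat ≤ N →
      pvWhileA moves nJ j res = res ++ PySem.Str.join " " (pvChain moves nJ j) := by
  intro N
  induction N with
  | zero =>
    intro j res hN
    rw [pvWhileA, pvChain, if_neg (by omega), if_neg (by omega), pvSJoin_nil]
    simp
  | succ N ih =>
    intro j res hN
    by_cases h : j ≤ nJ
    · rw [pvWhileA, if_pos h, pvChain, if_pos h]
      rw [ih (j + 10) _ (by omega)]
      by_cases h2 : j + 10 ≤ nJ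
      · rw [if_pos h2]
        conv_rhs => rw [pvChain, if_pos h2]
        rw [pvSJoin_cons_cons]
        simp [String.append_assoc]
        rw [pvChain, if_pos h2]
      · rw [if_neg h2]
        conv_rhs => rw [pvChain, if_neg h2]
        rw [pvSJoin_singleton]
        simp
        rw [pvChain, if_neg h2, pvSJoin_nil]
    · rw [pvWhileA, if_neg h, pvChain, if_neg h, pvSJoin_nil]
      simp

lemma pvChain_snoc (moves : List (List Int)) (m : Int) :
    ∀ (N : Nat) (j : Int), (m + 2 - j).toNat ≤ N → 1 ≤ j →
      pvChain moves (m + 1) j =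
        pvChain moves m j ++ (if j ≤ m + 1 ∧ (m + 1 - j) % 10 = 0 then [pvTok moves (m + 1)] else []) := by
  intro N
  induction N with
  | zero =>
    intro j hN hj
    rw [pvChain, if_neg (by omega), pvChain, if_neg (by omega), if_neg (by omega)]
    simp
  | succ N ih =>
    intro j hN hj
    by_cases h1 : j ≤ m + 1
    · rw [pvChain, if_pos h1]
      by_cases h2 : j ≤ m
      · conv_rhs => rw [pvChain, if_pos h2]
        rw [ih (j + 10) (by omega) (by omega)]
        have hiff : (j + 10 ≤ m + 1 ∧ (m + 1 - (j + 10)) % 10 = 0)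
            ↔ (j ≤ m + 1 ∧ (m + 1 - j) % 10 = 0) := by
          constructor
          · rintro ⟨a, b⟩; constructor <;> omega
          · rintro ⟨a, b⟩; constructor <;> omega
        simp only [hiff, List.cons_append]
      · have hj' : j = m + 1 := by omega
        subst hj'
        rw [pvChain, if_neg (by omega), pvChain, if_neg (by omega),
          if_pos ⟨le_refl _, by omega⟩]
        simp
    · rw [pvChain, if_neg h1, pvChain, if_neg (by omega), if_neg (by omega)]
      simp

lemma pvScatter (moves : List (List Int)) (L : Nat) (hL : L ≤ 10) :
    ∀ (m : Nat), (m ≤ L ∨ L = 10) →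
      (PySem.List.pyRange 1 ((m : Int) + 1) 1).foldl
        (fun bs j => bs.set ((j - 1) % 10).toNat
          (bs.getD ((j - 1) % 10).toNat [] ++ [pvTok moves j]))
        (List.replicate L ([] : List String))
      = (List.range L).map (fun (i : Nat) => pvChain moves (m : Int) ((i : Int) + 1)) := by
  intro m
  induction m with
  | zero =>
    intro _
    rw [show ((0 : Nat) : Int) + 1 = 1 by norm_num, PySem.List.pyRange_one_eq_nil (le_refl 1)]
    simp only [List.foldl_nil]
    have hnil : ∀ (i : Nat), i ∈ List.range L → pvChain moves ((0 : Nat) : Int) ((i : Int) + 1) = [] := by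
      intro i _
      rw [pvChain, if_neg (by omega)]
    rw [List.map_congr_left hnil, List.map_const', List.length_range]
  | succ m ih =>
    intro hcond
    have ih' := ih (by omega)
    have hstep : ((m + 1 : Nat) : Int) + 1 = ((m : Nat) : Int) + 1 + 1 := by push_cast; ring
    rw [hstep, PySem.List.pyRange_one_succ_right (by omega), List.foldl_append, ih']
    simp only [List.foldl_cons, List.foldl_nil]
    have hkval : (((m : Int) + 1 - 1) % 10).toNat = m % 10 := by omega
    have hkL : m % 10 < L := by
      rcases hcond with h | h
      · omega
      · omega
    apply List.ext_getElem
    · simp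
    · intro i h1 h2
      have hiL : i < L := by simpa using h2
      rw [List.getElem_set]
      simp only [List.getElem_map, List.getElem_range]
      have hsnoc := pvChain_snoc moves (m : Int)
        (((m : Int) + 2 - ((i : Int) + 1)).toNat) ((i : Int) + 1) (le_refl _) (by omega)
      have hcast : ((m + 1 : Nat) : Int) = (m : Int) + 1 := by push_cast; ring
      rw [hcast, hsnoc]
      by_cases hik : m % 10 = i
      · rw [if_pos (by omega), if_pos ⟨by omega, by omega⟩]
        congr 1
        rw [hkval, hik, List.getD_eq_getElem _ _ (by simp [hiL]), List.getElem_map,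
          List.getElem_range]
      · rw [if_neg (by omega), if_neg (by
          rintro ⟨ha, hb⟩
          have hi10 : i < 10 := by omega
          omega)]
        simp

lemma pvJoin_foldl : ∀ (l : List String) (init : String),
    l.foldl (· ++ ·) init = init ++ String.join l := by
  intro l
  induction l with
  | nil => intro init; simp [String.join]
  | cons a t ih =>
    intro init
    simp only [List.foldl_cons, String.join]
    rw [ih (init ++ a), ih ("" ++ a)]
    simp [String.append_assoc]

lemma pvJoin_cons (a : String) (l : List String) : String.join (a :: l) = a ++ String.join l := by
  conv_lhs => rw [String.join]
  simp only [List.foldl_cons]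
  rw [pvJoin_foldl]
  simp

lemma pvFoldlA (moves : List (List Int)) (nJ : Int) :
    ∀ (l : List Int) (init : String),
      l.foldl (fun res n => pvWhileA moves nJ n res ++ "\n") init
        = init ++ String.join (l.map (fun n => PySem.Str.join " " (pvChain moves nJ n) ++ "\n")) := by
  intro l
  induction l with
  | nil => intro init; simp [String.join]
  | cons x t ih =>
    intro init
    simp only [List.foldl_cons, List.map_cons, pvJoin_cons]
    rw [ih, pvWhileA_eq moves nJ ((nJ + 1 - x).toNat) x init (le_refl _)]
    simp [String.append_assoc]

-- ===== VERDICT (by name: the statement is the Claim_ definition above) =====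
theorem imprimirLances_spec : Claim_equal_imprimirLances := by
  intro partida _ _
  unfold Spec_imprimirLances imprimirLances imprimirLances_alt
  simp only []
  set moves := partida.getD 1 [] with hmv
  set nJ : Int := (moves.length : Int) - 1 with hnJ
  by_cases h0 : nJ ≤ 0
  · rw [if_pos h0, PySem.List.pyRange_one_eq_nil (by omega), List.foldl_nil]
  · rw [if_neg h0]
    set L : Nat := (min 10 nJ).toNat with hLdef
    have hnn : ((nJ.toNat : Nat) : Int) = nJ := by omega
    rw [pvFoldlA]
    rw [show nJ + 1 = ((nJ.toNat : Nat) : Int) + 1 from by omega]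
    rw [pvScatter moves L (by omega) nJ.toNat (by omega)]
    rw [PySem.List.pyRange_one]
    rw [show ((min 10 nJ + 1) - 1).toNat = L from by omega]
    simp only [List.map_map, hnn]
    rw [String.empty_append]
    congr 1
    apply List.map_congr_left
    intro i _
    simp [add_comm]
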